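-- pv_equiv track=rewrite | github.com/t1ooo/codewars.com | Strip-Comments.py | strip_comments_v2
-- ===== SOURCE A (Python) =====
-- def strip_comments_v2(string, markers):
--     lines = []
--     for line in string.split('\n'):
--         for i, ch in enumerate(line):
--             if ch in markers:
--                 line = line[:i]
--                 break
--         lines.append(line.rstrip())
--     return '\n'.join(lines)
-- ===== SOURCE B (Python) =====
-- def strip_comments_v2(string, markers):
--     def cut_line(line):
--         cut = min((line.find(m) for m in markers
--                    if len(m) == 1 and line.find(m) != -1),
--                   default=len(line))
--         return line[:cut].rstrip()
--     return '\n'.join(cut_line(line) for line in string.split('\n'))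
-- ===== Notes on version B (the rewrite author's own statement) =====
-- stated objective: alternative
-- what changed: The per-line char-by-char membership scan with break is replaced by one forward find per single-character marker, combined with min (default = line length), then a single slice+rstrip.
import Mathlib
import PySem

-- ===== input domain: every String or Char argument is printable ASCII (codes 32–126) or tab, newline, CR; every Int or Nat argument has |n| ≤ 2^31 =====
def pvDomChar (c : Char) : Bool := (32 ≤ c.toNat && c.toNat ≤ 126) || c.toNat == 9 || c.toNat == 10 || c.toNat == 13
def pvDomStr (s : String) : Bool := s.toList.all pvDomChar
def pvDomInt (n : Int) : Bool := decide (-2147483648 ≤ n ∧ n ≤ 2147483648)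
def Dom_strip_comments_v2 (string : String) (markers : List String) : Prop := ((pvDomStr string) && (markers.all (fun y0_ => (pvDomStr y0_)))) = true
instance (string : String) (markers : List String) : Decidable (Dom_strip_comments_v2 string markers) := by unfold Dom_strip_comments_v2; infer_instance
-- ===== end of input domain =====

-- B replaces A's char-by-char membership scan of each line by per-single-char-marker
-- find searches combined with min (objective: alternative traversal, same cost class).

-- ===== PORT A =====
-- inner loop: 'for i, ch in enumerate(line): if ch in markers: line = line[:i]; break'
def pvAScan (line0 : List Char) (markers : List String) : Nat → List Char → List Char
  | _, [] => line0
  | i, ch :: rest =>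
      if markers.contains (String.singleton ch) then PySem.List.slice line0 none (some (i : Int))
      else pvAScan line0 markers (i + 1) rest

def strip_comments_v2 (string : String) (markers : List String) : String :=
  let lines := (PySem.Chars.splitOn string.toList ['\n']).foldl
      (fun acc line => acc ++ [PySem.Chars.rstrip (pvAScan line markers 0 line)]) []
  String.ofList (PySem.Chars.join ['\n'] lines)

-- ===== PORT B =====
-- cut = min((line.find(m) for m in markers if len(m) == 1 and line.find(m) != -1), default=len(line))
def pvCut (ln : List Char) (markers : List String) : Nat :=
  ((markers.filter
      (fun m => PySem.Str.len m == 1 && PySem.Chars.find ln m.toList != -1)).map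
      (fun m => (PySem.Chars.find ln m.toList).toNat)).foldl min ln.length

def strip_comments_v2_alt (string : String) (markers : List String) : String :=
  String.ofList (PySem.Chars.join ['\n']
    ((PySem.Chars.splitOn string.toList ['\n']).map
      (fun line => PySem.Chars.rstrip (List.take (pvCut line markers) line))))

-- ===== PRECONDITION & SPEC =====
def Spec_strip_comments_v2 (string : String) (markers : List String) (out : String) : Prop := out = strip_comments_v2_alt string markers
instance (string : String) (markers : List String) (out : String) : Decidable (Spec_strip_comments_v2 string markers out) := by unfold Spec_strip_comments_v2; infer_instance

-- ===== CLAIM (what is proved, stated in full; the proofs are below) =====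
def Claim_equal_strip_comments_v2 : Prop := ∀ (string : String) (markers : List String), Dom_strip_comments_v2 string markers → Spec_strip_comments_v2 string markers (strip_comments_v2 string markers)

-- ===== LEMMAS AND PROOFS =====

-- the character predicate behind A's 'ch in markers'
def pvP (markers : List String) (c : Char) : Bool := markers.contains (String.singleton c)

theorem pv_singleton_prefix_iff (c : Char) (l : List Char) :
    [c] <+: l ↔ l.head? = some c := by
  cases l with
  | nil => simp
  | cons a t => simp [List.prefix_cons_iff, eq_comm]

theorem pv_singleton_prefix_drop_iff (c : Char) (l : List Char) (k : Nat) :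
    [c] <+: l.drop k ↔ l[k]? = some c := by
  rw [pv_singleton_prefix_iff, List.head?_drop]

-- A's inner loop yields line0.take of the offset of the first marker character
theorem pvAScan_eq (markers : List String) (line0 : List Char) :
    ∀ (t : List Char) (i : Nat),
      pvAScan line0 markers i t =
        if List.findIdx (pvP markers) t < t.length
        then List.take (i + List.findIdx (pvP markers) t) line0
        else line0 := by
  intro t
  induction t with
  | nil => intro i; simp [pvAScan]
  | cons ch rest ih =>
      intro i
      have hP : pvP markers ch = markers.contains (String.singleton ch) := rfl
      cases hc : markers.contains (String.singleton ch) with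
      | true =>
          simp only [pvAScan, hc, List.findIdx_cons, hP, cond_true, List.length_cons]
          rw [if_pos trivial, if_pos (Nat.succ_pos _),
              PySem.List.slice_to line0 (Int.natCast_nonneg i)]
          simp
      | false =>
          simp only [pvAScan, hc, List.findIdx_cons, hP, cond_false, List.length_cons]
          rw [if_neg (by simp), ih (i + 1)]
          by_cases h2 : List.findIdx (pvP markers) rest < rest.length
          · rw [if_pos h2, if_pos (Nat.add_lt_add_right h2 1)]
            congr 1
            omega
          · rw [if_neg h2, if_neg (fun hh => h2 (Nat.lt_of_add_lt_add_right hh))]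

theorem pvAScan_take (markers : List String) (ln : List Char) :
    pvAScan ln markers 0 ln = List.take (List.findIdx (pvP markers) ln) ln := by
  rw [pvAScan_eq]
  by_cases h : List.findIdx (pvP markers) ln < ln.length
  · rw [if_pos h]; congr 1; omega
  · rw [if_neg h]
    have hle := List.findIdx_le_length (p := pvP markers) (xs := ln)
    have heq : List.findIdx (pvP markers) ln = ln.length := by omega
    rw [heq, List.take_length]

-- for a single-char marker that occurs, find lands on or after the first marker char
theorem pv_find_ge (markers : List String) (ln : List Char) (c : Char)
    (hc : String.singleton c ∈ markers)
    (hne : PySem.Chars.find ln [c] ≠ -1) :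
    List.findIdx (pvP markers) ln ≤ (PySem.Chars.find ln [c]).toNat := by
  have h0 : 0 ≤ PySem.Chars.find ln [c] := by
    have := PySem.Chars.neg_one_le_find ln [c]
    omega
  obtain ⟨hpre, -⟩ := PySem.Chars.find_spec h0
  rw [pv_singleton_prefix_drop_iff] at hpre
  by_contra hlt
  rw [Nat.not_le] at hlt
  have hklen : (PySem.Chars.find ln [c]).toNat < ln.length := (List.getElem?_eq_some_iff.mp hpre).1
  have hget : ln[(PySem.Chars.find ln [c]).toNat] = c := by
    rw [List.getElem?_eq_getElem hklen] at hpre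
    exact Option.some_injective _ hpre
  have hfalse : pvP markers ln[(PySem.Chars.find ln [c]).toNat] = false := List.not_of_lt_findIdx hlt
  rw [hget] at hfalse
  simp [pvP] at hfalse
  exact hfalse hc

-- foldl min reaches exactly the shared lower bound j
theorem pv_foldl_min (j : Nat) :
    ∀ (l : List Nat) (d : Nat), j ≤ d → (∀ x ∈ l, j ≤ x) → (j = d ∨ j ∈ l) →
      l.foldl min d = j := by
  intro l
  induction l with
  | nil =>
      intro d _ _ hor
      rcases hor with h | h
      · simpa using h.symm
      · simp at h
  | cons x t ih =>
      intro d hd hall hor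
      simp only [List.foldl_cons]
      by_cases hjt : j ∈ t
      · exact ih (min d x) (le_min hd (hall x (by simp))) (fun y hy => hall y (by simp [hy])) (Or.inr hjt)
      · have hx : j ≤ x := hall x (by simp)
        have hm : min d x = j := by
          rcases hor with h | h
          · omega
          · simp at h
            rcases h with h | h
            · omega
            · exact absurd h hjt
        exact ih (min d x) (by omega) (fun y hy => hall y (by simp [hy])) (Or.inl hm.symm)

-- B's min-of-finds equals the index of the first marker character
theorem pvCut_eq (markers : List String) (ln : List Char) :
    pvCut ln markers = List.findIdx (pvP markers) ln := by
  unfold pvCut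
  apply pv_foldl_min
  · exact List.findIdx_le_length
  · intro x hx
    simp only [List.mem_map, List.mem_filter] at hx
    obtain ⟨m, ⟨hm, hcond⟩, hval⟩ := hx
    simp only [Bool.and_eq_true, beq_iff_eq, bne_iff_ne, ne_eq] at hcond
    obtain ⟨hlen, hfind⟩ := hcond
    obtain ⟨c, hml⟩ : ∃ c, m.toList = [c] := by
      have h1 : m.toList.length = 1 := by
        simp [PySem.Str.len] at hlen
        exact_mod_cast hlen
      match hl : m.toList, h1 with
      | [c], _ => exact ⟨c, rfl⟩
    have hmem : String.singleton c ∈ markers := by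
      have hmc : m = String.singleton c := by
        apply String.toList_inj.mp; rw [hml, String.toList_singleton]
      rwa [hmc] at hm
    rw [hml] at hval hfind
    rw [← hval]
    exact pv_find_ge markers ln c hmem hfind
  · by_cases h : List.findIdx (pvP markers) ln < ln.length
    · right
      have hget : pvP markers (ln[List.findIdx (pvP markers) ln]) = true := List.findIdx_getElem (w := h)
      have hmem : String.singleton (ln[List.findIdx (pvP markers) ln]'h) ∈ markers := by
        simpa [pvP] using hget
      have hpre : [ln[List.findIdx (pvP markers) ln]'h] <+: ln.drop (List.findIdx (pvP markers) ln) := by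
        rw [pv_singleton_prefix_drop_iff]
        exact List.getElem?_eq_getElem h
      have hinf : [ln[List.findIdx (pvP markers) ln]'h] <:+: ln :=
        hpre.isInfix.trans (List.drop_suffix _ ln).isInfix
      have h0 : 0 ≤ PySem.Chars.find ln [ln[List.findIdx (pvP markers) ln]'h] := by
        rw [PySem.Chars.find_nonneg_iff]; exact hinf
      have hne : PySem.Chars.find ln [ln[List.findIdx (pvP markers) ln]'h] ≠ -1 := by omega
      have hle := pv_find_ge markers ln _ hmem hne
      have hge : (PySem.Chars.find ln [ln[List.findIdx (pvP markers) ln]'h]).toNat ≤ List.findIdx (pvP markers) ln := by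
        by_contra hlt
        rw [Nat.not_le] at hlt
        obtain ⟨-, hmin⟩ := PySem.Chars.find_spec h0
        exact hmin _ hlt hpre
      have hkj : (PySem.Chars.find ln [ln[List.findIdx (pvP markers) ln]'h]).toNat = List.findIdx (pvP markers) ln :=
        le_antisymm hge hle
      simp only [List.mem_map, List.mem_filter]
      refine ⟨String.singleton (ln[List.findIdx (pvP markers) ln]'h), ⟨hmem, ?_⟩, ?_⟩
      · simp [PySem.Str.len, hne]
      · rw [String.toList_singleton, hkj]
    · left
      have hle := List.findIdx_le_length (p := pvP markers) (xs := ln)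
      omega

theorem pv_line_eq (markers : List String) (ln : List Char) :
    pvAScan ln markers 0 ln = List.take (pvCut ln markers) ln := by
  rw [pvAScan_take, pvCut_eq]

-- ===== VERDICT (by name: the statement is the Claim_ definition above) =====
theorem strip_comments_v2_spec : Claim_equal_strip_comments_v2 := by
  intro string markers _
  unfold Spec_strip_comments_v2 strip_comments_v2 strip_comments_v2_alt
  rw [PySem.List.foldl_append_singleton_eq_map]
  simp only [List.nil_append]
  congr 2
  apply List.map_congr_left
  intro ln _
  rw [pv_line_eq]
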